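-- pv_equiv track=rewrite | github.com/doocs/leetcode | solution/2500-2599/2535.Difference Between Element Sum and Digit Sum of an Array/Solution.py | differenceOfSum
-- ===== SOURCE A (Python) =====
-- from typing import List
--
-- def differenceOfSum(nums: List[int]) -> int:
--     x = y = 0
--     for v in nums:
--         x += v
--         while v:
--             y += v % 10
--             v //= 10
--     return x - y
-- ===== SOURCE B (Python) =====
-- from typing import List
--
-- def _trunc(v: int) -> int:
--     # sum of v // 10**k over all k >= 1 (0 when v < 10)
--     return 0 if v < 10 else v // 10 + _trunc(v // 10)
--
-- def differenceOfSum(nums: List[int]) -> int: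
--     # Identity: v - digitsum(v) = 9 * sum_{k>=1} floor(v / 10**k), so the answer is
--     # 9 times the total of the truncated-quotient sums; no element sum or digit sum is computed.
--     return 9 * sum(map(_trunc, nums))
-- ===== Notes on version B (the rewrite author's own statement) =====
-- stated objective: alternative
-- what changed: B never computes an element sum or a digit sum: it uses the identity v - digitsum(v) = 9*sum_{k>=1} floor(v/10^k) and returns 9 times the recursive truncated-quotient sums of the elements.
import Mathlib
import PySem

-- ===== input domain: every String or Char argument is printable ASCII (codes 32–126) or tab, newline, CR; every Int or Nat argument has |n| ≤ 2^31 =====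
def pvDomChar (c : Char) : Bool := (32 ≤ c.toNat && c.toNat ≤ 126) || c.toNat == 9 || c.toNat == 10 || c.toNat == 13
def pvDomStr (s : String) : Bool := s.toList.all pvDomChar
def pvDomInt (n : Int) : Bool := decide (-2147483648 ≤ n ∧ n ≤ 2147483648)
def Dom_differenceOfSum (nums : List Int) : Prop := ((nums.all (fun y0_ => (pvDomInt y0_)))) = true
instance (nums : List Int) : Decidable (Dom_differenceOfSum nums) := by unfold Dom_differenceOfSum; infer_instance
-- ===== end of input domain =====

-- B computes neither an element sum nor a digit sum: it returns 9 * Σ_v Σ_{k≥1} v // 10^k,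
-- which equals Σ v − Σ digitsum(v) by the identity v − digitsum(v) = 9·Σ_{k≥1} ⌊v/10^k⌋ (alternative decomposition).

-- ===== PORT A =====
-- A's inner 'while v: y += v % 10; v //= 10', ported on v.toNat (exact for v ≥ 0; Pre_ excludes negatives, where Python A never returns)
def pvWhileDigits (v : Nat) (y : Int) : Int :=
  if v = 0 then y else pvWhileDigits (v / 10) (y + (v % 10 : Nat))
termination_by v
decreasing_by exact Nat.div_lt_self (Nat.pos_of_ne_zero (by assumption)) (by norm_num)

def differenceOfSum (nums : List Int) : Int :=
  let s := nums.foldl (fun (xy : Int × Int) v => (xy.1 + v, pvWhileDigits v.toNat xy.2)) (0, 0)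
  s.1 - s.2

-- ===== PORT B =====
-- Source B's _trunc: 0 if v < 10 else v // 10 + _trunc(v // 10)
def pvTrunc (v : Int) : Int :=
  if v < 10 then 0
  else PySem.Int.floordiv v 10 + pvTrunc (PySem.Int.floordiv v 10)
termination_by v.toNat
decreasing_by
  rw [PySem.Int.floordiv_eq_ediv_of_pos (by norm_num)]
  omega

def differenceOfSum_alt (nums : List Int) : Int :=
  9 * (nums.map pvTrunc).foldl (· + ·) 0

-- ===== PRECONDITION & SPEC =====
-- Pre_ excludes negative elements: there Python A loops forever (v //= 10 sticks at -1), so A returns only on all-nonnegative lists.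
def Pre_differenceOfSum (nums : List Int) : Prop := ∀ v ∈ nums, 0 ≤ v
instance (nums : List Int) : Decidable (Pre_differenceOfSum nums) := by unfold Pre_differenceOfSum; infer_instance

def pvWitness_differenceOfSum : List Int := [123, 0, 47]

def Spec_differenceOfSum (nums : List Int) (out : Int) : Prop := out = differenceOfSum_alt nums
instance (nums : List Int) (out : Int) : Decidable (Spec_differenceOfSum nums out) := by unfold Spec_differenceOfSum; infer_instance

-- ===== CLAIM =====
def Claim_equal_differenceOfSum : Prop := ∀ (nums : List Int), Dom_differenceOfSum nums → Pre_differenceOfSum nums → Spec_differenceOfSum nums (differenceOfSum nums)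

-- ===== LEMMAS AND PROOFS =====

-- accumulator lemma for A's while loop
theorem pvWhileDigits_acc (v : Nat) : ∀ (y : Int), pvWhileDigits v y = pvWhileDigits v 0 + y := by
  induction v using Nat.strong_induction_on with
  | _ v ih =>
    intro y
    by_cases hv : v = 0
    · subst hv; simp [pvWhileDigits]
    · have hlt := Nat.div_lt_self (Nat.pos_of_ne_zero hv) (by norm_num : (1 : Nat) < 10)
      rw [pvWhileDigits, if_neg hv]
      conv_rhs => rw [pvWhileDigits, if_neg hv]
      rw [ih _ hlt (y + ((v % 10 : Nat) : Int)), ih _ hlt ((0 : Int) + ((v % 10 : Nat) : Int))]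
      ring

theorem foldl_add_init (l : List Int) : ∀ (c : Int), l.foldl (· + ·) c = c + l.foldl (· + ·) 0 := by
  induction l with
  | nil => simp
  | cons a t ih =>
    intro c
    simp only [List.foldl_cons]
    rw [ih (c + a), ih (0 + a)]
    ring

-- the pair fold of A, characterised component-wise
theorem foldA_eq (nums : List Int) : ∀ (x y : Int),
    nums.foldl (fun (xy : Int × Int) v => (xy.1 + v, pvWhileDigits v.toNat xy.2)) (x, y)
      = (x + nums.foldl (· + ·) 0,
         y + ((nums.map (fun v => pvWhileDigits v.toNat 0)).foldl (· + ·) 0)) := by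
  induction nums with
  | nil => simp
  | cons a t ih =>
    intro x y
    simp only [List.foldl_cons, List.map_cons]
    rw [ih, pvWhileDigits_acc]
    rw [foldl_add_init t (0 + a),
      foldl_add_init (t.map (fun v => pvWhileDigits v.toNat 0)) (0 + pvWhileDigits a.toNat 0)]
    simp only [Prod.mk.injEq]
    constructor <;> ring

-- key identity: for v ≥ 0, 9 * pvTrunc v = v - digitsum(v)
theorem pvTrunc_key (n : Nat) : ∀ (v : Int), v.toNat = n → 0 ≤ v →
    9 * pvTrunc v = v - pvWhileDigits v.toNat 0 := by
  induction n using Nat.strong_induction_on with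
  | _ n ih =>
    intro v hn hv
    by_cases h : v < 10
    · rw [pvTrunc, if_pos h]
      by_cases hz : v = 0
      · subst hz; simp [pvWhileDigits]
      · have h1 : v.toNat ≠ 0 := by omega
        rw [pvWhileDigits, if_neg h1, pvWhileDigits]
        have hd : v.toNat / 10 = 0 := by omega
        have hm : v.toNat % 10 = v.toNat := by omega
        rw [hd, if_pos rfl, hm]
        omega
    · rw [Int.not_lt] at h
      rw [pvTrunc, if_neg (by omega)]
      have hfd : PySem.Int.floordiv v 10 = v / 10 :=
        PySem.Int.floordiv_eq_ediv_of_pos (by norm_num)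
      set w := v / 10 with hw
      have hw0 : 0 ≤ w := by positivity
      have hwn : w.toNat < n := by
        have : w < v := by omega
        omega
      have ihw := ih w.toNat hwn w rfl hw0
      have hvn0 : v.toNat ≠ 0 := by omega
      rw [pvWhileDigits, if_neg hvn0, pvWhileDigits_acc]
      have hwt : v.toNat / 10 = w.toNat := by omega
      have hmt : ((v.toNat % 10 : Nat) : Int) = v % 10 := by omega
      rw [hwt, hmt, hfd]
      have h10 : 10 * w + v % 10 = v := by rw [hw]; omega
      linarith [ihw]

theorem pvTrunc_eq (v : Int) (hv : 0 ≤ v) :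
    9 * pvTrunc v = v - pvWhileDigits v.toNat 0 := pvTrunc_key v.toNat v rfl hv

-- ===== VERDICT =====
theorem sum_key (nums : List Int) (hpre : ∀ v ∈ nums, 0 ≤ v) :
    nums.sum - (nums.map (fun v => pvWhileDigits v.toNat 0)).sum = 9 * (nums.map pvTrunc).sum := by
  induction nums with
  | nil => simp
  | cons a t iht =>
    have ha : 0 ≤ a := hpre a (by simp)
    have iht' := iht (fun v hv => hpre v (by simp [hv]))
    simp only [List.map_cons, List.sum_cons]
    have hk := pvTrunc_eq a ha
    linarith [hk, iht']

theorem differenceOfSum_spec : Claim_equal_differenceOfSum := by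
  intro nums _ hpre
  unfold Spec_differenceOfSum differenceOfSum differenceOfSum_alt
  simp only
  rw [foldA_eq]
  simp only [zero_add]
  rw [← List.sum_eq_foldl, ← List.sum_eq_foldl, ← List.sum_eq_foldl]
  exact sum_key nums hpre
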